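-- pv_equiv track=rewrite | github.com/pabloaugusto/dotfiles | scripts/ai_atlassian_seed_lib.py | workflow_transition_path
-- ===== SOURCE A (Python) =====
-- WORKFLOW_TRANSITION_GRAPH = {
--     "backlog": ["refinement"],
--     "refinement": ["ready"],
--     "ready": ["doing"],
--     "doing": ["testing", "paused"],
--     "paused": ["doing"],
--     "testing": ["review"],
--     "review": ["done"],
--     "done": [],
-- }
--
-- def workflow_transition_path(
--     current_logical_status: str,
--     target_logical_status: str,
-- ) -> list[str]:
--     current = current_logical_status.strip().casefold()
--     target = target_logical_status.strip().casefold()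
--     if not current or not target:
--         return []
--     if current == target:
--         return [current]
--     if current not in WORKFLOW_TRANSITION_GRAPH or target not in WORKFLOW_TRANSITION_GRAPH:
--         return []
--
--     queue: list[list[str]] = [[current]]
--     visited = {current}
--     while queue:
--         path = queue.pop(0)
--         node = path[-1]
--         for neighbor in WORKFLOW_TRANSITION_GRAPH.get(node, []):
--             if neighbor in visited:
--                 continue
--             next_path = [*path, neighbor]
--             if neighbor == target:
--                 return next_path
--             visited.add(neighbor)
--             queue.append(next_path)
--     return []
-- ===== SOURCE B (Python) =====
-- _CHAIN = ["backlog", "refinement", "ready", "doing", "testing", "review", "done"]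
--
--
-- def workflow_transition_path(
--     current_logical_status: str,
--     target_logical_status: str,
-- ) -> list[str]:
--     current = current_logical_status.strip().casefold()
--     target = target_logical_status.strip().casefold()
--     if not current or not target:
--         return []
--     if current == target:
--         return [current]
--     known = current in _CHAIN or current == "paused"
--     known_t = target in _CHAIN or target == "paused"
--     if not known or not known_t:
--         return []
--     # The workflow is a chain with "paused" hanging off "doing"; the unique
--     # simple path is a chain slice, possibly prefixed/suffixed with "paused".
--     if current == "paused":
--         i = _CHAIN.index("doing")
--         j = _CHAIN.index(target)
--         return ["paused"] + _CHAIN[i:j + 1] if i <= j else []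
--     if target == "paused":
--         i = _CHAIN.index(current)
--         j = _CHAIN.index("doing")
--         return _CHAIN[i:j + 1] + ["paused"] if i <= j else []
--     i = _CHAIN.index(current)
--     j = _CHAIN.index(target)
--     return _CHAIN[i:j + 1] if i < j else []
-- ===== Notes on version B (the rewrite author's own statement) =====
-- stated objective: alternative
-- what changed: Replaced the FIFO-queue BFS over the transition graph by a closed-form computation on the linear chain backlog..done with 'paused' hanging off 'doing': the path is a chain slice _CHAIN[i:j+1], optionally prefixed/suffixed with 'paused'; no queue, no visited set, no graph traversal.
import Mathlib
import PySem

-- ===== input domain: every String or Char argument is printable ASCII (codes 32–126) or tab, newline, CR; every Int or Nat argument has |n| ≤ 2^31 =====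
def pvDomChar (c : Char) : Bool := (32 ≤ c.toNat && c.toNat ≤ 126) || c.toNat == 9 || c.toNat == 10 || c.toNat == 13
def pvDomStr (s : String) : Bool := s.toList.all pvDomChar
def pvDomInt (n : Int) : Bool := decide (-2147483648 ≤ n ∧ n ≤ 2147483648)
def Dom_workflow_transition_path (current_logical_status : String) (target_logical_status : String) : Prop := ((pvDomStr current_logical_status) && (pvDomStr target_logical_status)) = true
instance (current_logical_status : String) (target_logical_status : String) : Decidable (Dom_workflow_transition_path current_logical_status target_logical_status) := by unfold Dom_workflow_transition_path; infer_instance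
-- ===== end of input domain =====

-- B replaces the FIFO-queue BFS by a closed-form chain-slice computation on the fixed
-- workflow chain (with "paused" hanging off "doing"); objective: alternative algorithm.
-- (str.casefold = Str.lower exactly on the ASCII domain Dom_.)

-- ===== PORT A =====
def wtGraph : PySem.Dict String (List String) := PySem.Dict.mk
  [("backlog", ["refinement"]), ("refinement", ["ready"]), ("ready", ["doing"]),
   ("doing", ["testing", "paused"]), ("paused", ["doing"]),
   ("testing", ["review"]), ("review", ["done"]), ("done", [])]

-- the 'for neighbor in …' body: returns (found-path?, updated queue, updated visited)
def wtInner (target : String) (path : List String) :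
    List String → List (List String) → PySem.Set String →
    Option (List String) × List (List String) × PySem.Set String
  | [], queue, visited => (none, queue, visited)
  | n :: ns, queue, visited =>
    if PySem.Set.contains visited n then wtInner target path ns queue visited
    else if n == target then (some (path ++ [n]), queue, visited)
    else wtInner target path ns (queue ++ [path ++ [n]]) (PySem.Set.add visited n)

-- the 'while queue:' loop; fuel only makes the loop total (the queue receives at most
-- one path per graph node, so 32 steps are never exhausted on any input)
def wtBfs (target : String) : List (List String) → PySem.Set String → Nat → List String
  | _, _, 0 => []
  | [], _, _ + 1 => []
  | path :: rest, visited, fuel + 1 =>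
    match PySem.List.pyGet? path (-1) with   -- path[-1]; paths in the queue are nonempty
    | none => []
    | some node =>
      match wtInner target path (PySem.Dict.getD wtGraph node []) rest visited with
      | (some found, _, _) => found
      | (none, q, v) => wtBfs target q v fuel

def wtA_core (current target : String) : List String :=
  if current == "" || target == "" then []
  else if current == target then [current]
  else if !(PySem.Dict.contains wtGraph current) || !(PySem.Dict.contains wtGraph target) then []
  else wtBfs target [[current]] (PySem.Set.ofList [current]) 32

def workflow_transition_path (current_logical_status : String) (target_logical_status : String) : List String :=
  wtA_core (PySem.Str.lower (PySem.Str.strip current_logical_status))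
           (PySem.Str.lower (PySem.Str.strip target_logical_status))

-- ===== PORT B =====
def wtChain : List String := ["backlog", "refinement", "ready", "doing", "testing", "review", "done"]

def wtB_core (current target : String) : List String :=
  if current == "" || target == "" then []
  else if current == target then [current]
  else
    let known := wtChain.contains current || current == "paused"
    let knownT := wtChain.contains target || target == "paused"
    if !known || !knownT then []
    else if current == "paused" then
      match PySem.List.index? wtChain "doing", PySem.List.index? wtChain target with
      | some i, some j =>
        if i ≤ j then "paused" :: PySem.List.slice wtChain (some (i : Int)) (some ((j : Int) + 1)) else []
      | _, _ => []   -- unreachable: both strings are in wtChain here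
    else if target == "paused" then
      match PySem.List.index? wtChain current, PySem.List.index? wtChain "doing" with
      | some i, some j =>
        if i ≤ j then PySem.List.slice wtChain (some (i : Int)) (some ((j : Int) + 1)) ++ ["paused"] else []
      | _, _ => []
    else
      match PySem.List.index? wtChain current, PySem.List.index? wtChain target with
      | some i, some j =>
        if i < j then PySem.List.slice wtChain (some (i : Int)) (some ((j : Int) + 1)) else []
      | _, _ => []

def workflow_transition_path_alt (current_logical_status : String) (target_logical_status : String) : List String :=
  wtB_core (PySem.Str.lower (PySem.Str.strip current_logical_status))
           (PySem.Str.lower (PySem.Str.strip target_logical_status))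

-- ===== PRECONDITION & SPEC =====
def Spec_workflow_transition_path (current_logical_status : String) (target_logical_status : String) (out : List String) : Prop := out = workflow_transition_path_alt current_logical_status target_logical_status
instance (current_logical_status : String) (target_logical_status : String) (out : List String) : Decidable (Spec_workflow_transition_path current_logical_status target_logical_status out) := by unfold Spec_workflow_transition_path; infer_instance

-- ===== CLAIM (what is proved, stated in full; the proofs are below) =====
def Claim_equal_workflow_transition_path : Prop := ∀ (current_logical_status : String) (target_logical_status : String), Dom_workflow_transition_path current_logical_status target_logical_status → Spec_workflow_transition_path current_logical_status target_logical_status (workflow_transition_path current_logical_status target_logical_status)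

-- ===== LEMMAS AND PROOFS =====
theorem wt_core_eq (c t : String) : wtA_core c t = wtB_core c t := by
  by_cases hcm : c ∈ (["backlog", "refinement", "ready", "doing", "paused", "testing", "review", "done"] : List String)
  · by_cases htm : t ∈ (["backlog", "refinement", "ready", "doing", "paused", "testing", "review", "done"] : List String)
    · fin_cases hcm <;> fin_cases htm <;> decide
    · simp only [List.mem_cons, List.not_mem_nil, or_false] at htm
      push Not at htm
      obtain ⟨h1, h2, h3, h4, h5, h6, h7, h8⟩ := htm
      unfold wtA_core wtB_core
      simp [wtGraph, wtChain, h1.symm, h2.symm, h3.symm, h4.symm, h5.symm, h6.symm, h7.symm, h8.symm, h1, h2, h3, h4, h5, h6, h7, h8]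
  · simp only [List.mem_cons, List.not_mem_nil, or_false] at hcm
    push Not at hcm
    obtain ⟨h1, h2, h3, h4, h5, h6, h7, h8⟩ := hcm
    unfold wtA_core wtB_core
    simp [wtGraph, wtChain, h1.symm, h2.symm, h3.symm, h4.symm, h5.symm, h6.symm, h7.symm, h8.symm, h1, h2, h3, h4, h5, h6, h7, h8]

-- ===== VERDICT (by name: the statement is the Claim_ definition above) =====
theorem workflow_transition_path_spec : Claim_equal_workflow_transition_path := by
  intro c t _
  unfold Spec_workflow_transition_path workflow_transition_path workflow_transition_path_alt
  exact wt_core_eq _ _
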